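-- pv_equiv track=rewrite | github.com/DanielNav/Proyecto-L-gica-2 | Proyecto_logica_full.py | transformacion_clausulas
-- ===== SOURCE A (Python) =====
-- def transformacion_clausulas(C):
--     L = []
--
--     while len(C)>0:
--         S = C[0]
--         if S == "O" or S == "(" or S==")":
--             C = C[1:]
--
--         elif S == "-":
--             literal = S + C[1]
--             L.append(literal)
--             C = C[2:]
--
--         else:
--             L.append(S)
--             C = C[1:]
--
--     return L
-- ===== SOURCE B (Python) =====
-- def transformacion_clausulas(C):
--     # pass 1: merge each '-' with the following token (IndexError if none, like A)
--     merged = []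
--     i = 0
--     while i < len(C):
--         if C[i] == "-":
--             merged.append("-" + C[i + 1])
--             i += 2
--         else:
--             merged.append(C[i])
--             i += 1
--     # pass 2: drop standalone separators
--     return [t for t in merged if t not in ("O", "(", ")")]
-- ===== Notes on version B (the rewrite author's own statement) =====
-- stated objective: faster
-- what changed: Replaces A's single loop that repeatedly slices the remaining list and filters inline with a two-phase decomposition: an index-walking first pass that only merges '-' with its following token, then a comprehension filtering out 'O','(',')'.
import Mathlib
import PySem

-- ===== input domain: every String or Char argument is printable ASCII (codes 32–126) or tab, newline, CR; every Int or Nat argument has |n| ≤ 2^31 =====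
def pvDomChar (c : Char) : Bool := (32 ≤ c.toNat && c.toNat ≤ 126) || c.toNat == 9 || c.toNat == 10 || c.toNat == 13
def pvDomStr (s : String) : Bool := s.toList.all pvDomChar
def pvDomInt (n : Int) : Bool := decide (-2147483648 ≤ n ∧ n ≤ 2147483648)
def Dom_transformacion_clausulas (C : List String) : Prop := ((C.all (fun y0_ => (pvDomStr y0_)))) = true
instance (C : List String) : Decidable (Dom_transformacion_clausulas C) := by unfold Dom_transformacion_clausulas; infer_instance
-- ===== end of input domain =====

-- B re-decomposes A's single filtering/merging loop into a merge pass followed by a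
-- filter pass (objective: alternative; same results, including which inputs raise).

-- ===== PORT A =====
-- A's while loop with accumulator L; the branch where Python raises IndexError
-- (C = ["-"]) is outside Pre_ and returns the accumulator.
def pvGoA : List String → List String → List String
  | [], L => L
  | S :: rest, L =>
    if S = "O" ∨ S = "(" ∨ S = ")" then pvGoA rest L
    else if S = "-" then
      match rest with
      | [] => L                              -- Python raises here (excluded by Pre_)
      | t :: r2 => pvGoA r2 (L ++ ["-" ++ t])
    else pvGoA rest (L ++ [S])

def transformacion_clausulas (C : List String) : List String := pvGoA C []

-- ===== PORT B =====
-- first pass of Source B: merge each "-" with the following token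
def pvMergeNeg : List String → List String
  | [] => []
  | s :: r =>
    if s = "-" then
      match r with
      | [] => []                             -- Python raises here (excluded by Pre_)
      | t :: r2 => ("-" ++ t) :: pvMergeNeg r2
    else s :: pvMergeNeg r

def transformacion_clausulas_alt (C : List String) : List String :=
  (pvMergeNeg C).filter (fun t => !(t == "O" || t == "(" || t == ")"))

-- ===== PRECONDITION & SPEC =====
-- Both Pythons raise IndexError exactly when the scan lands on a final "-" with no
-- successor, which happens iff the maximal trailing run of "-" tokens has odd length;
-- Pre_ excludes exactly those inputs.
def Pre_transformacion_clausulas (C : List String) : Prop :=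
  (C.reverse.takeWhile (fun s => s == "-")).length % 2 = 0
instance (C : List String) : Decidable (Pre_transformacion_clausulas C) := by
  unfold Pre_transformacion_clausulas; infer_instance

def pvWitness_transformacion_clausulas : List String := ["(", "-", "p", "O", "q", ")"]

def Spec_transformacion_clausulas (C : List String) (out : List String) : Prop := out = transformacion_clausulas_alt C
instance (C : List String) (out : List String) : Decidable (Spec_transformacion_clausulas C out) := by unfold Spec_transformacion_clausulas; infer_instance

-- ===== CLAIM (what is proved, stated in full; the proofs are below) =====
def Claim_equal_transformacion_clausulas : Prop := ∀ (C : List String), Dom_transformacion_clausulas C → Pre_transformacion_clausulas C → Spec_transformacion_clausulas C (transformacion_clausulas C)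

-- ===== LEMMAS AND PROOFS =====

theorem dash_append_not_sep (t : String) :
    ¬("-" ++ t = "O" ∨ "-" ++ t = "(" ∨ "-" ++ t = ")") := by
  have h : ("-" ++ t).toList = '-' :: t.toList := by
    simp [String.toList_append]
  rintro (h1 | h1 | h1) <;> rw [h1] at h <;> simp_all

theorem pvMergeNeg_cons_ne (s : String) (r : List String) (h : ¬ s = "-") :
    pvMergeNeg (s :: r) = s :: pvMergeNeg r := by
  rw [pvMergeNeg.eq_def]; simp [h]

theorem pvMergeNeg_dash_cons (t : String) (r : List String) :
    pvMergeNeg ("-" :: t :: r) = ("-" ++ t) :: pvMergeNeg r := by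
  rw [pvMergeNeg.eq_def]; simp

theorem pvMergeNeg_dash_nil : pvMergeNeg ["-"] = [] := by
  rw [pvMergeNeg.eq_def]; simp

theorem pvGoA_eq_alt (C L : List String) :
    pvGoA C L = L ++ (pvMergeNeg C).filter (fun t => !(t == "O" || t == "(" || t == ")")) := by
  fun_induction pvGoA C L with
  | case1 L => simp [pvMergeNeg]
  | case2 S rest L hsep ih =>
      have hS : ¬ S = "-" := by rcases hsep with h | h | h <;> simp [h]
      rw [ih, pvMergeNeg_cons_ne S rest hS, List.filter]
      rcases hsep with h | h | h <;> simp [h]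
  | case3 a b =>
      simp [pvMergeNeg_dash_nil]
  | case4 a b c d e =>
      have hk := dash_append_not_sep b
      rw [e, pvMergeNeg_dash_cons b c, List.filter]
      have hb : ("-" ++ b == "O" || "-" ++ b == "(" || "-" ++ b == ")") = false := by
        simp only [Bool.or_eq_false_iff, beq_eq_false_iff_ne, ne_eq]
        exact ⟨⟨fun h => hk (Or.inl h), fun h => hk (Or.inr (Or.inl h))⟩,
               fun h => hk (Or.inr (Or.inr h))⟩
      simp [hb]
  | case5 S rest L hsep hdash ih =>
      rw [ih, pvMergeNeg_cons_ne S rest hdash, List.filter]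
      have hb : (S == "O" || S == "(" || S == ")") = false := by
        simp only [Bool.or_eq_false_iff, beq_eq_false_iff_ne, ne_eq]
        exact ⟨⟨fun h => hsep (Or.inl h), fun h => hsep (Or.inr (Or.inl h))⟩,
               fun h => hsep (Or.inr (Or.inr h))⟩
      simp [hb]

-- ===== VERDICT (by name: the statement is the Claim_ definition above) =====
theorem transformacion_clausulas_spec : Claim_equal_transformacion_clausulas := by
  intro C _ _
  unfold Spec_transformacion_clausulas transformacion_clausulas transformacion_clausulas_alt
  simpa using pvGoA_eq_alt C []
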